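-- pv_equiv track=rewrite | github.com/oernster/trainer | src/core/services/station_name_normalizer.py | are_stations_equivalent
-- ===== SOURCE A (Python) =====
-- def are_stations_equivalent(station1: str, station2: str) -> bool:
--     """
--     Check if two station names refer to the same station.
--
--     Args:
--         station1: First station name
--         station2: Second station name
--
--     Returns:
--         True if the stations are equivalent, False otherwise
--     """
--     # Normalize station names for comparison
--     def normalize_for_comparison(name):
--         return name.lower().replace(" ", "").replace("-", "").replace("(", "").replace(")", "")
--
--     norm1 = normalize_for_comparison(station1)
--     norm2 = normalize_for_comparison(station2)
--
--     # Exact match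
--     if norm1 == norm2:
--         return True
--
--     # Handle London prefix variants
--     if norm1.startswith("london"):
--         base1 = norm1[6:]  # Remove "london"
--         if base1 == norm2:
--             return True
--
--     if norm2.startswith("london"):
--         base2 = norm2[6:]  # Remove "london"
--         if base2 == norm1:
--             return True
--
--     # Common variations
--     variations = [
--         ("central", ""),
--         ("main", ""),
--         ("parkway", ""),
--         ("international", ""),
--     ]
--
--     for var1, var2 in variations:
--         if norm1.replace(var1, var2) == norm2 or norm1 == norm2.replace(var1, var2):
--             return True
--
--     return False
-- ===== SOURCE B (Python) =====
-- def are_stations_equivalent(station1: str, station2: str) -> bool: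
--     """Check if two station names refer to the same station."""
--     def normalize(name):
--         # one pass: drop separator chars, lowercase the rest
--         return "".join(c.lower() for c in name if c not in ' -()')
--
--     def reduces_to(src, dst, token):
--         # True iff src with all (left-to-right, non-overlapping) occurrences of
--         # token deleted equals dst -- streaming two-pointer scan, never builds
--         # the reduced string.
--         i = j = 0
--         n, m, k = len(src), len(dst), len(token)
--         while i < n:
--             if src.startswith(token, i):
--                 i += k
--             elif j < m and src[i] == dst[j]:
--                 i += 1
--                 j += 1
--             else:
--                 return False
--         return j == m
--
--     n1 = normalize(station1)
--     n2 = normalize(station2)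
--     if n1 == n2 or n1 == "london" + n2 or n2 == "london" + n1:
--         return True
--     return any(reduces_to(n1, n2, t) or reduces_to(n2, n1, t)
--                for t in ("central", "main", "parkway", "international"))
-- ===== Notes on version B (the rewrite author's own statement) =====
-- stated objective: alternative
-- what changed: B normalizes in one pass (filter separators, lowercase per char) instead of five sequential replace passes, tests the London prefix by string concatenation equality instead of startswith plus slicing, and decides each variation-removal comparison with a streaming two-pointer matcher that never materializes the replaced string, instead of building norm.replace(var,'') and comparing.
import Mathlib
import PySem

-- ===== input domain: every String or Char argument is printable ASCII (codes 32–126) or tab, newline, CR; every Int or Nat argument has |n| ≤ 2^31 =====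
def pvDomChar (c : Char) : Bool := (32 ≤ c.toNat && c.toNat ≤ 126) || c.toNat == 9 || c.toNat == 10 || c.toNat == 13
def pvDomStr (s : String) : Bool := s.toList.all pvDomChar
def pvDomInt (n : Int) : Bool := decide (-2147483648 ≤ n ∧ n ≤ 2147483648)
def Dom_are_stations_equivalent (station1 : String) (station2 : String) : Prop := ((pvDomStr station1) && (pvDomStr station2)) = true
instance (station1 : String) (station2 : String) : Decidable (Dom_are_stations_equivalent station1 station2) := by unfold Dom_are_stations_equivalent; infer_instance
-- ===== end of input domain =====

-- B replaces A's replace-built candidate comparisons by a streaming two-pointer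
-- matcher (never builds the reduced string), a one-pass normalize, and a
-- concatenation test for the London prefix (objective: alternative).


-- ===== PORT A =====
-- name.lower().replace(" ","").replace("-","").replace("(","").replace(")","")
def pvNormalize (name : List Char) : List Char :=
  PySem.Chars.replace
    (PySem.Chars.replace
      (PySem.Chars.replace
        (PySem.Chars.replace (PySem.Chars.lower name) [' '] [])
        ['-'] [])
      ['('] [])
    [')'] []

def pvVariations : List (List Char × List Char) :=
  [(['c','e','n','t','r','a','l'], []),
   (['m','a','i','n'], []),
   (['p','a','r','k','w','a','y'], []),
   (['i','n','t','e','r','n','a','t','i','o','n','a','l'], [])]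

def pvLondon : List Char := ['l','o','n','d','o','n']

def are_stations_equivalent (station1 : String) (station2 : String) : Bool :=
  let norm1 := pvNormalize station1.toList
  let norm2 := pvNormalize station2.toList
  if norm1 == norm2 then true
  else if PySem.Chars.startswith norm1 pvLondon
          && PySem.List.slice norm1 (some 6) none == norm2 then true
  else if PySem.Chars.startswith norm2 pvLondon
          && PySem.List.slice norm2 (some 6) none == norm1 then true
  else pvVariations.any (fun p =>
    PySem.Chars.replace norm1 p.1 p.2 == norm2
      || norm1 == PySem.Chars.replace norm2 p.1 p.2)

-- ===== PORT B =====
-- "".join(c.lower() for c in name if c not in ' -()')  — one pass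
def pvNormalizeB (name : List Char) : List Char :=
  (name.filter (fun c => !([' ', '-', '(', ')'].contains c))).map PySem.Chars.lowerChar

-- the while loop of reduces_to: position i is the remaining suffix of src,
-- position j the remaining suffix of dst; fuel = initial length of src
def pvReducesGo (tok : List Char) : Nat → List Char → List Char → Bool
  | _, [], dst => dst == []
  | 0, _ :: _, _ => false
  | fuel+1, c :: t, dst =>
      if tok.isPrefixOf (c :: t) then pvReducesGo tok fuel ((c :: t).drop tok.length) dst
      else match dst with
        | [] => false
        | d :: ds => c == d && pvReducesGo tok fuel t ds

def pvReduces (src dst tok : List Char) : Bool := pvReducesGo tok src.length src dst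

def pvTokens : List (List Char) :=
  [['c','e','n','t','r','a','l'],
   ['m','a','i','n'],
   ['p','a','r','k','w','a','y'],
   ['i','n','t','e','r','n','a','t','i','o','n','a','l']]

def are_stations_equivalent_alt (station1 : String) (station2 : String) : Bool :=
  let n1 := pvNormalizeB station1.toList
  let n2 := pvNormalizeB station2.toList
  if n1 == n2 || n1 == pvLondon ++ n2 || n2 == pvLondon ++ n1 then true
  else pvTokens.any (fun t => pvReduces n1 n2 t || pvReduces n2 n1 t)

-- ===== PRECONDITION & SPEC =====
def Spec_are_stations_equivalent (station1 : String) (station2 : String) (out : Bool) : Prop := out = are_stations_equivalent_alt station1 station2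
instance (station1 : String) (station2 : String) (out : Bool) : Decidable (Spec_are_stations_equivalent station1 station2 out) := by unfold Spec_are_stations_equivalent; infer_instance

-- ===== CLAIM (what is proved, stated in full; the proofs are below) =====
def Claim_equal_are_stations_equivalent : Prop := ∀ (station1 : String) (station2 : String), Dom_are_stations_equivalent station1 station2 → Spec_are_stations_equivalent station1 station2 (are_stations_equivalent station1 station2)

-- ===== LEMMAS AND PROOFS =====

-- replace.go with empty replacement: the accumulator factors out
lemma pv_go_acc (tok : List Char) : ∀ (fuel : Nat) (s acc : List Char),
    PySem.Chars.replace.go tok [] fuel s acc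
      = acc.reverse ++ PySem.Chars.replace.go tok [] fuel s [] := by
  intro fuel
  induction fuel with
  | zero => intro s acc; simp [PySem.Chars.replace.go]
  | succ n ih =>
      intro s acc
      cases s with
      | nil => simp [PySem.Chars.replace.go]
      | cons c t =>
          simp only [PySem.Chars.replace.go]
          split
          · simp only [List.reverse_nil, List.nil_append]
            rw [ih _ acc]
          · rw [ih _ (c :: acc), ih _ [c]]
            simp

-- single-character replace-by-nothing is a filter
lemma pv_replace_single (x : Char) (s : List Char) :
    PySem.Chars.replace s [x] [] = s.filter (fun c => !(c == x)) := by
  have h : ∀ (fuel : Nat) (s : List Char), s.length ≤ fuel →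
      PySem.Chars.replace.go [x] [] fuel s [] = s.filter (fun c => !(c == x)) := by
    intro fuel
    induction fuel with
    | zero =>
        intro s hs
        have : s = [] := List.eq_nil_of_length_eq_zero (Nat.le_zero.mp hs)
        subst this; simp [PySem.Chars.replace.go]
    | succ n ih =>
        intro s hs
        cases s with
        | nil => simp [PySem.Chars.replace.go]
        | cons c t =>
            simp only [PySem.Chars.replace.go]
            by_cases hx : c = x
            · subst hx
              rw [if_pos (by simp [List.isPrefixOf])]
              simp only [List.length, List.drop, List.reverse_nil, List.nil_append]
              rw [ih t (by simpa using hs)]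
              simp
            · rw [if_neg (by simp [List.isPrefixOf]; exact fun h => hx h.symm)]
              rw [pv_go_acc, ih t (by simpa using hs)]
              simp [hx]
  rw [PySem.Chars.replace]
  simp only [List.isEmpty_cons, Bool.false_eq_true, if_false]
  exact h s.length s le_rfl

lemma pv_lower_beq_sep (c x : Char) (hx : x.toNat < 65) :
    (PySem.Chars.lowerChar c == x) = (c == x) := by
  simp only [PySem.Chars.lowerChar]
  split
  · rename_i hU
    have h1 : 'A' ≤ c ∧ c ≤ 'Z' := by simpa [PySem.Chars.isupper] using hU
    have hA : 65 ≤ c.toNat := by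
      have := h1.1; rw [Char.le_def] at this; exact UInt32.le_iff_toNat_le.mp this
    have hval : (Char.ofNat (c.toNat + 32)).toNat = c.toNat + 32 := by
      have hZ : c.toNat ≤ 90 := by
        have := h1.2; rw [Char.le_def] at this; exact UInt32.le_iff_toNat_le.mp this
      have hv : Nat.isValidChar (c.toNat + 32) := Or.inl (by omega)
      simp [Char.ofNat, hv]
    have l : Char.ofNat (c.toNat + 32) ≠ x := by
      intro h; rw [h] at hval; omega
    have r : c ≠ x := by
      intro h; rw [← h] at hx; omega
    simp [l, r]
  · rfl

-- the two normalizations agree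
lemma pv_normalize_eq (name : List Char) : pvNormalizeB name = pvNormalize name := by
  unfold pvNormalize pvNormalizeB
  rw [pv_replace_single, pv_replace_single, pv_replace_single, pv_replace_single]
  rw [List.filter_filter, List.filter_filter, List.filter_filter]
  simp only [PySem.Chars.lower, List.filter_map]
  congr 1
  apply List.filter_congr
  intro c _
  simp only [Function.comp,
    pv_lower_beq_sep c ' ' (by decide), pv_lower_beq_sep c '-' (by decide),
    pv_lower_beq_sep c '(' (by decide), pv_lower_beq_sep c ')' (by decide),
    List.contains_cons, List.contains_nil]
  cases h1 : c == ' ' <;> cases h2 : c == '-' <;> cases h3 : c == '(' <;> cases h4 : c == ')' <;> rfl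

-- the london branch: startswith + drop-6 equality is a concatenation equation
lemma pv_london (n1 n2 : List Char) :
    (PySem.Chars.startswith n1 pvLondon && (PySem.List.slice n1 (some 6) none == n2))
      = (n1 == pvLondon ++ n2) := by
  rw [Bool.eq_iff_iff]
  simp only [Bool.and_eq_true, beq_iff_eq, PySem.Chars.startswith_iff]
  constructor
  · rintro ⟨⟨t, ht⟩, hs⟩
    subst ht
    rw [show ((6:Int)) = ((6:Nat):Int) by norm_num,
        PySem.List.slice_from_natCast] at hs
    simp [pvLondon] at hs
    simp [hs, pvLondon]
  · intro h
    subst h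
    refine ⟨⟨n2, rfl⟩, ?_⟩
    rw [show ((6:Int)) = ((6:Nat):Int) by norm_num,
        PySem.List.slice_from_natCast]
    simp [pvLondon]

-- the streaming matcher computes equality with the replaced string
lemma pv_reducesGo_eq (tok : List Char) (hne : tok ≠ []) :
    ∀ (fuel : Nat) (src dst : List Char), src.length ≤ fuel →
      pvReducesGo tok fuel src dst = (PySem.Chars.replace.go tok [] fuel src [] == dst) := by
  intro fuel
  induction fuel with
  | zero =>
      intro src dst hs
      have : src = [] := List.eq_nil_of_length_eq_zero (Nat.le_zero.mp hs)
      subst this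
      simp [pvReducesGo, PySem.Chars.replace.go]
  | succ n ih =>
      intro src dst hs
      cases src with
      | nil =>
          simp [pvReducesGo, PySem.Chars.replace.go]
      | cons c t =>
          simp only [pvReducesGo, PySem.Chars.replace.go]
          split
          · rename_i hpre
            have hlen : ((c :: t).drop tok.length).length ≤ n := by
              have h1 : 1 ≤ tok.length := by
                cases tok with
                | nil => exact absurd rfl hne
                | cons a b => simp
              have h2 : ((c :: t).drop tok.length).length
                  = (c :: t).length - tok.length := by simp
              simp only [List.length_cons] at hs h2
              omega
            rw [ih _ dst hlen]
            simp
          · rw [pv_go_acc]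
            cases dst with
            | nil =>
                simp only [List.reverse_cons, List.reverse_nil, List.nil_append,
                  List.cons_append]
                rfl
            | cons d ds =>
                show (c == d && pvReducesGo tok n t ds) = _
                rw [ih t ds (by simpa using hs)]
                simp only [List.reverse_cons, List.reverse_nil, List.nil_append,
                  List.cons_append]
                rw [Bool.eq_iff_iff]
                simp only [Bool.and_eq_true, beq_iff_eq, List.cons_eq_cons]

lemma pv_reduces_eq (n1 n2 tok : List Char) (hne : tok ≠ []) :
    pvReduces n1 n2 tok = (PySem.Chars.replace n1 tok [] == n2) := by
  unfold pvReduces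
  rw [pv_reducesGo_eq tok hne n1.length n1 n2 le_rfl]
  rw [PySem.Chars.replace]
  cases tok with
  | nil => exact absurd rfl hne
  | cons a b => simp

-- the two bodies agree for any pair of normalized names
lemma pv_body_eq (n1 n2 : List Char) :
    (if n1 == n2 then true
     else if PySem.Chars.startswith n1 pvLondon
             && PySem.List.slice n1 (some 6) none == n2 then true
     else if PySem.Chars.startswith n2 pvLondon
             && PySem.List.slice n2 (some 6) none == n1 then true
     else pvVariations.any (fun p =>
       PySem.Chars.replace n1 p.1 p.2 == n2
         || n1 == PySem.Chars.replace n2 p.1 p.2))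
    =
    (if n1 == n2 || n1 == pvLondon ++ n2 || n2 == pvLondon ++ n1 then true
     else pvTokens.any (fun t => pvReduces n1 n2 t || pvReduces n2 n1 t)) := by
  have hvar : pvVariations.any (fun p =>
       PySem.Chars.replace n1 p.1 p.2 == n2
         || n1 == PySem.Chars.replace n2 p.1 p.2)
      = pvTokens.any (fun t => pvReduces n1 n2 t || pvReduces n2 n1 t) := by
    simp only [pvVariations, pvTokens, List.any_cons, List.any_nil, pv_reduces_eq,
      ne_eq, reduceCtorEq, not_false_eq_true]
    rw [Bool.eq_iff_iff]
    simp only [Bool.or_eq_true, beq_iff_eq, eq_comm (a := n1)]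
  rw [pv_london n1 n2, pv_london n2 n1, hvar]
  rw [Bool.eq_iff_iff]
  split_ifs <;> simp_all

-- ===== VERDICT (by name: the statement is the Claim_ definition above) =====
theorem are_stations_equivalent_spec : Claim_equal_are_stations_equivalent := by
  intro s1 s2 _
  unfold Spec_are_stations_equivalent are_stations_equivalent are_stations_equivalent_alt
  rw [pv_normalize_eq, pv_normalize_eq]
  exact pv_body_eq (pvNormalize s1.toList) (pvNormalize s2.toList)
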